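-- pv_equiv track=rewrite | github.com/BOSONCODE/cryptology | PlayFair.py | preHandle
-- ===== SOURCE A (Python) =====
-- def preHandle(s):
--     ans = ""
--     lens = len(s)
--     i = 0
--     while i < lens:
--         ans += s[i]
--         if i + 1 == lens:
--             break
--         if s[i] == s[i+1]:
--             ans += 'X'
--         else:
--             ans += s[i+1]
--             i = i + 1
--         i = i + 1
--     return ans
-- ===== SOURCE B (Python) =====
-- def preHandle(s):
--     out = []
--     first = None
--     for c in s:
--         if first is None:
--             first = c
--         elif first == c:
--             out.append(first)
--             out.append('X')
--             first = c
--         else: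
--             out.append(first)
--             out.append(c)
--             first = None
--     if first is not None:
--         out.append(first)
--     return "".join(out)
-- ===== Notes on version B (the rewrite author's own statement) =====
-- stated objective: faster
-- what changed: Replaced the index-based while loop with variable step and O(n^2) string concatenation by a single for-loop state machine holding one pending character, appending to a list joined once at the end.
import Mathlib
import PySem

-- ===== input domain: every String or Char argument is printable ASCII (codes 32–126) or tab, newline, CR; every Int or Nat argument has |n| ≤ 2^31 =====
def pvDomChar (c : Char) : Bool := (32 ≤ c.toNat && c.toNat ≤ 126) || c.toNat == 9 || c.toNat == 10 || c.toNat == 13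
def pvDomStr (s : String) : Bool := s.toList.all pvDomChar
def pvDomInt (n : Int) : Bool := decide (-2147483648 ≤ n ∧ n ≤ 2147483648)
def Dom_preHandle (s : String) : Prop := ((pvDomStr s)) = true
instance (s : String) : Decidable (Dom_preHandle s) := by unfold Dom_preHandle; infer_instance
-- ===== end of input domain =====

-- B replaces A's index-based while loop (variable step) by a one-pass state machine
-- with a single pending-character state; objective: idiomatic, same result.

-- ===== PORT A =====
-- A's while loop: index i, appends s[i]; on duplicate appends 'X' and advances 1,
-- otherwise appends s[i+1] and advances 2.  i < lens guards every access.
def preHandleLoop (cs : List Char) (lens i : Nat) (ans : List Char) : List Char :=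
  if i < lens then
    let ans := ans ++ [cs.getD i ' ']
    if i + 1 = lens then ans
    else if cs.getD i ' ' = cs.getD (i+1) ' ' then
      preHandleLoop cs lens (i + 1) (ans ++ ['X'])
    else
      preHandleLoop cs lens (i + 1 + 1) (ans ++ [cs.getD (i+1) ' '])
  else ans
termination_by lens - i

def preHandle (s : String) : String :=
  String.mk (preHandleLoop s.toList s.toList.length 0 [])

-- ===== PORT B =====
-- state machine: `first` is the pending first-of-pair (none initially); flush it at the end.
def preHandleAltLoop (first : Option Char) (cs : List Char) (out : List Char) : List Char :=
  match first, cs with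
  | none, [] => out
  | some f, [] => out ++ [f]
  | none, c :: rest => preHandleAltLoop (some c) rest out
  | some f, c :: rest =>
    if f = c then preHandleAltLoop (some c) rest (out ++ [f, 'X'])
    else preHandleAltLoop none rest (out ++ [f, c])

def preHandle_alt (s : String) : String :=
  String.mk (preHandleAltLoop none s.toList [])

-- ===== PRECONDITION & SPEC =====
def Spec_preHandle (s : String) (out : String) : Prop := out = preHandle_alt s
instance (s : String) (out : String) : Decidable (Spec_preHandle s out) := by unfold Spec_preHandle; infer_instance

-- ===== CLAIM (what is proved, stated in full; the proofs are below) =====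
def Claim_equal_preHandle : Prop := ∀ (s : String), Dom_preHandle s → Spec_preHandle s (preHandle s)

-- ===== LEMMAS AND PROOFS =====

-- common specification: left-to-right pairing with X on duplicates
def pairSpec : List Char → List Char
  | [] => []
  | [a] => [a]
  | a :: b :: rest =>
    if a = b then a :: 'X' :: pairSpec (b :: rest)
    else a :: b :: pairSpec rest

theorem loopB_spec (cs : List Char) :
    (∀ out, preHandleAltLoop none cs out = out ++ pairSpec cs) ∧
    (∀ a out, preHandleAltLoop (some a) cs out = out ++ pairSpec (a :: cs)) := by
  induction cs with
  | nil => simp [preHandleAltLoop, pairSpec]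
  | cons c rest ih =>
    constructor
    · intro out
      rw [preHandleAltLoop, ih.2]
    · intro a out
      by_cases h : a = c
      · simp only [preHandleAltLoop, pairSpec, h, ih.2]
        simp
      · simp only [preHandleAltLoop, pairSpec, if_neg h, ih.1]
        simp

theorem loopA_spec (cs : List Char) : ∀ i ans, preHandleLoop cs cs.length i ans = ans ++ pairSpec (cs.drop i) := by
  intro i
  induction hn : cs.length - i using Nat.strong_induction_on generalizing i with
  | _ n ih =>
    intro ans
    by_cases hi : i < cs.length
    · have hdrop : cs.drop i = cs[i] :: cs.drop (i+1) := List.drop_eq_getElem_cons hi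
      have hgi : cs.getD i ' ' = cs[i] := List.getD_eq_getElem cs ' ' hi
      rw [preHandleLoop, if_pos hi]
      by_cases hlast : i + 1 = cs.length
      · have : cs.drop (i+1) = [] := by rw [hlast, List.drop_length]
        rw [if_pos hlast, hdrop, this, hgi]
        simp [pairSpec]
      · have hi1 : i + 1 < cs.length := Nat.lt_of_le_of_ne hi hlast
        have hdrop1 : cs.drop (i+1) = cs[i+1] :: cs.drop (i+2) := List.drop_eq_getElem_cons hi1
        have hgi1 : cs.getD (i+1) ' ' = cs[i+1] := List.getD_eq_getElem cs ' ' hi1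
        rw [if_neg hlast, hgi, hgi1]
        by_cases heq : cs[i] = cs[i+1]
        · rw [if_pos heq, ih (cs.length - (i+1)) (by omega) (i+1) rfl]
          rw [hdrop, hdrop1]
          show _ = ans ++ pairSpec (cs[i] :: cs[i+1] :: cs.drop (i+2))
          rw [pairSpec, if_pos heq, ← hdrop1]
          simp
        · rw [if_neg heq, ih (cs.length - (i+1+1)) (by omega) (i+1+1) rfl]
          rw [hdrop, hdrop1]
          show _ = ans ++ pairSpec (cs[i] :: cs[i+1] :: cs.drop (i+2))
          rw [pairSpec, if_neg heq]
          simp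
    · rw [preHandleLoop, if_neg hi]
      rw [List.drop_of_length_le (Nat.le_of_not_lt hi)]
      simp [pairSpec]

-- ===== VERDICT (by name: the statement is the Claim_ definition above) =====
theorem preHandle_spec : Claim_equal_preHandle := by
  intro s _
  unfold Spec_preHandle preHandle preHandle_alt
  rw [loopA_spec s.toList 0 [], (loopB_spec s.toList).1 []]
  simp
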